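-- pv_equiv track=rewrite | github.com/espeedsx/EllieScoreFollowingDebug | debug/src/failure_analyzer.py | _analyze_pitch_categorization
-- ===== SOURCE A (Python) =====
-- from typing import List, Dict, Any, Optional, Tuple
--
-- def _analyze_pitch_categorization(match_analyses: List[Dict]) -> Dict[str, int]:
--     """Analyze how the pitch was categorized."""
--     categories = {
--         'chord': sum(1 for m in match_analyses if 'is_chord' in m and m['is_chord']),
--         'trill': sum(1 for m in match_analyses if 'is_trill' in m and m['is_trill']),
--         'grace': sum(1 for m in match_analyses if 'is_grace' in m and m['is_grace']),
--         'extra': sum(1 for m in match_analyses if 'is_extra' in m and m['is_extra']),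
--         'ignored': sum(1 for m in match_analyses if 'is_ignored' in m and m['is_ignored'])
--     }
--     return categories
-- ===== SOURCE B (Python) =====
-- def _analyze_pitch_categorization(match_analyses):
--     """Analyze how the pitch was categorized."""
--     categories = {'chord': 0, 'trill': 0, 'grace': 0, 'extra': 0, 'ignored': 0}
--     for m in match_analyses:
--         if m.get('is_chord'):
--             categories['chord'] += 1
--         if m.get('is_trill'):
--             categories['trill'] += 1
--         if m.get('is_grace'):
--             categories['grace'] += 1
--         if m.get('is_extra'):
--             categories['extra'] += 1
--         if m.get('is_ignored'):
--             categories['ignored'] += 1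
--     return categories
-- ===== Notes on version B (the rewrite author's own statement) =====
-- stated objective: simpler
-- what changed: Replaces five independent generator-expression scans of match_analyses (one per flag) with a single loop that updates all five counters at once over a pre-initialized dict.
import Mathlib
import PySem

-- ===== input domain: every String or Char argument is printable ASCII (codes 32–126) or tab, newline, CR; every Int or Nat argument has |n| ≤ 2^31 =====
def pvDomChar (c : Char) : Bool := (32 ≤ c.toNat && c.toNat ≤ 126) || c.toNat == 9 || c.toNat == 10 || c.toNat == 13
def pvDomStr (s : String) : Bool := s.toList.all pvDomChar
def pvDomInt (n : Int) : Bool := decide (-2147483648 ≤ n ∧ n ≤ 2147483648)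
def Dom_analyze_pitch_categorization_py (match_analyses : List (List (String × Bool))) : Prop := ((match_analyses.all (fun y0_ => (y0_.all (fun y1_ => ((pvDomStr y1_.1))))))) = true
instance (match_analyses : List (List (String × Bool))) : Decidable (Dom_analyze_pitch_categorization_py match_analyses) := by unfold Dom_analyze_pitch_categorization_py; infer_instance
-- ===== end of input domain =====

-- B replaces A's five independent counting scans with a single pass updating five counters; objective: simpler.


-- ===== PORT A =====
-- 'k in m and m[k]' on a Python dict: first (only) binding of k, false when absent.
def pvFlag (m : List (String × Bool)) (k : String) : Bool :=
  match m.find? (fun p => p.1 == k) with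
  | some p => p.2
  | none => false

-- sum(1 for m in match_analyses if 'is_X' in m and m['is_X']), one scan per flag
def pvCountFlag (match_analyses : List (List (String × Bool))) (k : String) : Int :=
  match_analyses.foldl (fun acc m => if pvFlag m k then acc + 1 else acc) 0

def analyze_pitch_categorization_py (match_analyses : List (List (String × Bool))) : List (String × Int) :=
  [("chord", pvCountFlag match_analyses "is_chord"),
   ("trill", pvCountFlag match_analyses "is_trill"),
   ("grace", pvCountFlag match_analyses "is_grace"),
   ("extra", pvCountFlag match_analyses "is_extra"),
   ("ignored", pvCountFlag match_analyses "is_ignored")]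

-- ===== PORT B =====
-- single pass: one step of B's loop body updates all five counters
def pvAltStep (acc : Int × Int × Int × Int × Int) (m : List (String × Bool)) :
    Int × Int × Int × Int × Int :=
  let (c, t, g, e, i) := acc
  ((if pvFlag m "is_chord" then c + 1 else c),
   (if pvFlag m "is_trill" then t + 1 else t),
   (if pvFlag m "is_grace" then g + 1 else g),
   (if pvFlag m "is_extra" then e + 1 else e),
   (if pvFlag m "is_ignored" then i + 1 else i))

def analyze_pitch_categorization_py_alt (match_analyses : List (List (String × Bool))) : List (String × Int) :=
  let (c, t, g, e, i) := match_analyses.foldl pvAltStep (0, 0, 0, 0, 0)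
  [("chord", c), ("trill", t), ("grace", g), ("extra", e), ("ignored", i)]

-- ===== PRECONDITION & SPEC =====
def Spec_analyze_pitch_categorization_py (match_analyses : List (List (String × Bool))) (out : List (String × Int)) : Prop := out = analyze_pitch_categorization_py_alt match_analyses
instance (match_analyses : List (List (String × Bool))) (out : List (String × Int)) : Decidable (Spec_analyze_pitch_categorization_py match_analyses out) := by unfold Spec_analyze_pitch_categorization_py; infer_instance

-- ===== CLAIM (what is proved, stated in full; the proofs are below) =====
def Claim_equal_analyze_pitch_categorization_py : Prop := ∀ (match_analyses : List (List (String × Bool))), Dom_analyze_pitch_categorization_py match_analyses → Spec_analyze_pitch_categorization_py match_analyses (analyze_pitch_categorization_py match_analyses)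

-- ===== LEMMAS AND PROOFS =====

-- B's fused loop computes, componentwise, A's five partial counting loops.
theorem pvAltLoop_eq (l : List (List (String × Bool))) :
    ∀ (c t g e i : Int),
      l.foldl pvAltStep (c, t, g, e, i) =
        (l.foldl (fun acc m => if pvFlag m "is_chord" then acc + 1 else acc) c,
         l.foldl (fun acc m => if pvFlag m "is_trill" then acc + 1 else acc) t,
         l.foldl (fun acc m => if pvFlag m "is_grace" then acc + 1 else acc) g,
         l.foldl (fun acc m => if pvFlag m "is_extra" then acc + 1 else acc) e,
         l.foldl (fun acc m => if pvFlag m "is_ignored" then acc + 1 else acc) i) := by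
  induction l with
  | nil => intro c t g e i; rfl
  | cons m rest ih =>
      intro c t g e i
      simp only [List.foldl_cons, pvAltStep]
      exact ih _ _ _ _ _

-- ===== VERDICT (by name: the statement is the Claim_ definition above) =====
theorem analyze_pitch_categorization_py_spec : Claim_equal_analyze_pitch_categorization_py := by
  intro match_analyses _
  unfold Spec_analyze_pitch_categorization_py
  unfold analyze_pitch_categorization_py analyze_pitch_categorization_py_alt pvCountFlag
  rw [pvAltLoop_eq]
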